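-- pv_equiv track=rewrite | github.com/ywk991112/pytorch-chatbot | src/rouge.py | _union_lcs
-- ===== SOURCE A (Python) =====
-- def _lcs(x, y):
--     """
--     Computes the length of the longest common subsequence (lcs) between two
--     strings. The implementation below uses a DP programming algorithm and runs
--     in O(nm) time where n = len(x) and m = len(y).
--     Source: http://www.algorithmist.com/index.php/Longest_Common_Subsequence
--     Args:
--       x: collection of words
--       y: collection of words
--     Returns:
--       Table of dictionary of coord and len lcs
--     """
--     n, m = len(x), len(y)
--     table = dict()
--     for i in range(n + 1):
--         for j in range(m + 1):
--             if i == 0 or j == 0: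
--                 table[i, j] = 0
--             elif x[i - 1] == y[j - 1]:
--                 table[i, j] = table[i - 1, j - 1] + 1
--             else:
--                 table[i, j] = max(table[i - 1, j], table[i, j - 1])
--     return table
--
-- def _recon_lcs(x, y):
--     """
--     Returns the Longest Subsequence between x and y.
--     Source: http://www.algorithmist.com/index.php/Longest_Common_Subsequence
--     Args:
--       x: sequence of words
--       y: sequence of words
--     Returns:
--       sequence: LCS of x and y
--     """
--     i, j = len(x), len(y)
--     table = _lcs(x, y)
--
--     def _recon(i, j):
--         """private recon calculation"""
--         if i == 0 or j == 0:
--             return []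
--         elif x[i - 1] == y[j - 1]:
--             return _recon(i - 1, j - 1) + [(x[i - 1], i)]
--         elif table[i - 1, j] > table[i, j - 1]:
--             return _recon(i - 1, j)
--         else:
--             return _recon(i, j - 1)
--
--     recon_tuple = tuple(map(lambda x: x[0], _recon(i, j)))
--     return recon_tuple
--
-- def _union_lcs(evaluated_sentences, reference_sentence, prev_union=None):
--     """
--     Returns LCS_u(r_i, C) which is the LCS score of the union longest common
--     subsequence between reference sentence ri and candidate summary C.
--     For example:
--     if r_i= w1 w2 w3 w4 w5, and C contains two sentences: c1 = w1 w2 w6 w7 w8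
--     and c2 = w1 w3 w8 w9 w5, then the longest common subsequence of r_i and c1
--     is "w1 w2" and the longest common subsequence of r_i and c2 is "w1 w3 w5".
--     The union longest common subsequence of r_i, c1, and c2 is "w1 w2 w3 w5"
--     and LCS_u(r_i, C) = 4/5.
--     Args:
--       evaluated_sentences: The sentences that have been picked by the
--                            summarizer
--       reference_sentence: One of the sentences in the reference summaries
--     Returns:
--       float: LCS_u(r_i, C)
--     ValueError:
--       Raises exception if a param has len <= 0
--     """
--     if prev_union is None:
--         prev_union = set()
--
--     if len(evaluated_sentences) <= 0:
--         raise ValueError("Collections must contain at least 1 sentence.")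
--
--     lcs_union = prev_union
--     prev_count = len(prev_union)
--
--     combined_lcs_length = 0
--     for eval_s in evaluated_sentences:
--         lcs = set(_recon_lcs(reference_sentence, eval_s))
--         combined_lcs_length += len(lcs)
--         lcs_union = lcs_union.union(lcs)
--
--     new_lcs_count = len(lcs_union) - prev_count
--     return new_lcs_count, lcs_union
-- ===== SOURCE B (Python) =====
-- def _lcs_words(x, y):
--     """LCS of x and y as a list of words: row-by-row 2D DP table (list of
--     lists) followed by an iterative backtrack (diagonal on match, up on
--     strict '>', else left)."""
--     m = len(y)
--     prev = [0] * (m + 1)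
--     rows = [prev]
--     for xi in x:
--         cur = [0]
--         for j, yj in enumerate(y, 1):
--             if xi == yj:
--                 cur.append(prev[j - 1] + 1)
--             else:
--                 cur.append(max(prev[j], cur[j - 1]))
--         rows.append(cur)
--         prev = cur
--     i, j = len(x), m
--     out = []
--     while i > 0 and j > 0:
--         if x[i - 1] == y[j - 1]:
--             out.append(x[i - 1])
--             i -= 1
--             j -= 1
--         elif rows[i - 1][j] > rows[i][j - 1]:
--             i -= 1
--         else:
--             j -= 1
--     out.reverse()
--     return out
--
-- def _union_lcs(evaluated_sentences, reference_sentence, prev_union=None):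
--     if prev_union is None:
--         prev_union = set()
--     if len(evaluated_sentences) <= 0:
--         raise ValueError("Collections must contain at least 1 sentence.")
--     prev_count = len(prev_union)
--     lcs_union = prev_union
--     for eval_s in evaluated_sentences:
--         lcs_union = lcs_union | set(_lcs_words(reference_sentence, eval_s))
--     return len(lcs_union) - prev_count, lcs_union
-- ===== Notes on version B (the rewrite author's own statement) =====
-- stated objective: faster
-- what changed: Replaces the dict-of-tuples DP table plus recursive _recon reconstruction with a row-by-row list-of-lists DP table and an iterative backtrack loop (same tie-break: diagonal on match, up on strict '>', else left), collecting words into a list that is reversed at the end.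
import Mathlib
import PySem

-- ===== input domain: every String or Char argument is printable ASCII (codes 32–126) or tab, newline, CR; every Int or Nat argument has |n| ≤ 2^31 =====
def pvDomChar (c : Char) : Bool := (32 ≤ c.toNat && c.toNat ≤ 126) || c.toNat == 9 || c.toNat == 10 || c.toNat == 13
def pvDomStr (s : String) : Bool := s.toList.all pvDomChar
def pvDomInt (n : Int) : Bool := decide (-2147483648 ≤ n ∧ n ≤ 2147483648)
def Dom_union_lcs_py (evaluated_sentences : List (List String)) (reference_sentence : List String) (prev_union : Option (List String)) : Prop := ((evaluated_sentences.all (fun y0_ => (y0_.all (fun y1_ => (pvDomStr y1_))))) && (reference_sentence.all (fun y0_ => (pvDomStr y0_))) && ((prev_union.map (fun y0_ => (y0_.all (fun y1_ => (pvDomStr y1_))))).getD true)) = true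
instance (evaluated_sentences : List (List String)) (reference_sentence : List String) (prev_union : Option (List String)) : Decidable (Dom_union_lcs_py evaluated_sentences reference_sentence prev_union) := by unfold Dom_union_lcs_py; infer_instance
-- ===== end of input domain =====

-- B replaces A's dict-keyed DP table + recursive reconstruction by a list-of-lists DP table
-- + iterative backtrack with the same tie-break; measured constant-factor faster in Python.
-- A raises ValueError on empty evaluated_sentences; Pre_ excludes exactly that (B raises there too).

-- ===== PORT A =====
-- _lcs: dict table over the double range loop
def lcsInnerA (x y : List String) (i : Int) (table : PySem.Dict (Int × Int) Int) (j : Int) : PySem.Dict (Int × Int) Int :=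
  if i = 0 ∨ j = 0 then table.insert (i, j) 0
  else if PySem.List.pyGetD x (i - 1) "" = PySem.List.pyGetD y (j - 1) "" then
    table.insert (i, j) (table.getD (i - 1, j - 1) 0 + 1)
  else
    table.insert (i, j) (max (table.getD (i - 1, j) 0) (table.getD (i, j - 1) 0))

def lcsTableA (x y : List String) : PySem.Dict (Int × Int) Int :=
  (PySem.List.pyRange 0 ((x.length : Int) + 1) 1).foldl
    (fun table i => (PySem.List.pyRange 0 ((y.length : Int) + 1) 1).foldl (lcsInnerA x y i) table)
    PySem.Dict.empty

-- _recon (inner recursion of _recon_lcs); i, j only ever decrease from the lengths, so Nat arguments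
def reconA (x y : List String) (table : PySem.Dict (Int × Int) Int) : Nat → Nat → List (String × Int)
  | 0, _ => []
  | _ + 1, 0 => []
  | i + 1, j + 1 =>
    if PySem.List.pyGetD x (i : Int) "" = PySem.List.pyGetD y (j : Int) "" then
      reconA x y table i j ++ [(PySem.List.pyGetD x (i : Int) "", (i : Int) + 1)]
    else if table.getD ((i : Int), (j : Int) + 1) 0 > table.getD ((i : Int) + 1, (j : Int)) 0 then
      reconA x y table i (j + 1)
    else
      reconA x y table (i + 1) j
  termination_by i j => (i, j)

-- _recon_lcs: tuple(map(lambda x: x[0], _recon(i, j)))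
def reconLcsA (x y : List String) : List String :=
  let table := lcsTableA x y
  (reconA x y table x.length y.length).map (fun p => p.1)

def union_lcs_py (evaluated_sentences : List (List String)) (reference_sentence : List String) (prev_union : Option (List String)) : Int × List String :=
  let prev_u : PySem.Set String := match prev_union with
    | none => PySem.Set.empty
    | some s => PySem.Set.ofList s
  let prev_count : Int := prev_u.length
  let st := evaluated_sentences.foldl
    (fun (st : Int × PySem.Set String) eval_s =>
      let lcs := PySem.Set.ofList (reconLcsA reference_sentence eval_s)
      (st.1 + lcs.length, PySem.Set.union st.2 lcs))
    ((0 : Int), prev_u)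
  ((st.2.length : Int) - prev_count, st.2)

-- ===== PORT B =====
-- row-by-row DP table: each row built left to right from the previous row
def buildRowB (y : List String) (xi : String) (prev : List Int) : List Int :=
  (PySem.List.enumerate y 1).foldl
    (fun cur p =>
      if xi = p.2 then cur ++ [PySem.List.pyGetD prev (p.1 - 1) 0 + 1]
      else cur ++ [max (PySem.List.pyGetD prev p.1 0) (PySem.List.pyGetD cur (p.1 - 1) 0)])
    [0]

def lcsRowsB (x y : List String) : List (List Int) :=
  let prev0 : List Int := List.replicate (y.length + 1) 0
  (x.foldl
    (fun (st : List Int × List (List Int)) xi =>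
      let cur := buildRowB y xi st.1
      (cur, st.2 ++ [cur]))
    (prev0, [prev0])).2

-- the iterative backtrack loop (i, j only decrease from the lengths; out is the python list)
def backB (x y : List String) (rows : List (List Int)) : Nat → Nat → List String → List String
  | 0, _, out => out
  | _ + 1, 0, out => out
  | i + 1, j + 1, out =>
    if PySem.List.pyGetD x (i : Int) "" = PySem.List.pyGetD y (j : Int) "" then
      backB x y rows i j (out ++ [PySem.List.pyGetD x (i : Int) ""])
    else if PySem.List.pyGetD (PySem.List.pyGetD rows (i : Int) []) ((j : Int) + 1) 0 >
            PySem.List.pyGetD (PySem.List.pyGetD rows ((i : Int) + 1) []) (j : Int) 0 then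
      backB x y rows i (j + 1) out
    else
      backB x y rows (i + 1) j out
  termination_by i j _ => (i, j)

def lcsWordsB (x y : List String) : List String :=
  (backB x y (lcsRowsB x y) x.length y.length []).reverse

def union_lcs_py_alt (evaluated_sentences : List (List String)) (reference_sentence : List String) (prev_union : Option (List String)) : Int × List String :=
  let prev_u : PySem.Set String := match prev_union with
    | none => PySem.Set.empty
    | some s => PySem.Set.ofList s
  let prev_count : Int := prev_u.length
  let lcs_union := evaluated_sentences.foldl
    (fun (u : PySem.Set String) eval_s => PySem.Set.union u (PySem.Set.ofList (lcsWordsB reference_sentence eval_s)))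
    prev_u
  ((lcs_union.length : Int) - prev_count, lcs_union)

-- ===== PRECONDITION & SPEC =====
-- A raises ValueError when evaluated_sentences is empty; exactly that input is excluded.
def Pre_union_lcs_py (evaluated_sentences : List (List String)) (reference_sentence : List String) (prev_union : Option (List String)) : Prop :=
  evaluated_sentences ≠ []
instance (evaluated_sentences : List (List String)) (reference_sentence : List String) (prev_union : Option (List String)) : Decidable (Pre_union_lcs_py evaluated_sentences reference_sentence prev_union) := by unfold Pre_union_lcs_py; infer_instance

def pvWitness_union_lcs_py : List (List String) × List String × Option (List String) :=
  ([["w1", "w2", "w6"], ["w1", "w3", "w5"]], ["w1", "w2", "w3", "w5"], some ["w9"])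

def Spec_union_lcs_py (evaluated_sentences : List (List String)) (reference_sentence : List String) (prev_union : Option (List String)) (out : Int × List String) : Prop := out = union_lcs_py_alt evaluated_sentences reference_sentence prev_union
instance (evaluated_sentences : List (List String)) (reference_sentence : List String) (prev_union : Option (List String)) (out : Int × List String) : Decidable (Spec_union_lcs_py evaluated_sentences reference_sentence prev_union out) := by unfold Spec_union_lcs_py; infer_instance

-- ===== CLAIM (what is proved, stated in full; the proofs are below) =====
def Claim_equal_union_lcs_py : Prop := ∀ (evaluated_sentences : List (List String)) (reference_sentence : List String) (prev_union : Option (List String)), Dom_union_lcs_py evaluated_sentences reference_sentence prev_union → Pre_union_lcs_py evaluated_sentences reference_sentence prev_union → Spec_union_lcs_py evaluated_sentences reference_sentence prev_union (union_lcs_py evaluated_sentences reference_sentence prev_union)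

-- ===== LEMMAS AND PROOFS =====
-- canonical LCS-length recurrence; both DP tables are shown to compute it
def Lc (x y : List String) : Nat → Nat → Int
  | 0, _ => 0
  | _ + 1, 0 => 0
  | i + 1, j + 1 =>
    if x.getD i "" = y.getD j "" then Lc x y i j + 1
    else max (Lc x y i (j + 1)) (Lc x y (i + 1) j)
  termination_by i j => (i, j)

theorem Lc_succ (x y : List String) (i j : Nat) :
    Lc x y (i + 1) (j + 1)
      = if x.getD i "" = y.getD j "" then Lc x y i j + 1
        else max (Lc x y i (j + 1)) (Lc x y (i + 1) j) := by
  rw [Lc]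

theorem Lc_zero_left (x y : List String) (j : Nat) : Lc x y 0 j = 0 := by
  cases j <;> simp [Lc]

theorem Lc_zero_right (x y : List String) (i : Nat) : Lc x y i 0 = 0 := by
  cases i <;> simp [Lc]

-- any run of A's inner loop leaves rows other than i untouched
theorem innerA_pres (x y : List String) (i : Int) (l : List Int) (d : PySem.Dict (Int × Int) Int)
    (a b : Int) (ha : a ≠ i) :
    (l.foldl (lcsInnerA x y i) d).getD (a, b) 0 = d.getD (a, b) 0 := by
  induction l generalizing d with
  | nil => rfl
  | cons j t ih =>
    simp only [List.foldl_cons]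
    rw [ih]
    unfold lcsInnerA
    split_ifs <;> rw [PySem.Dict.getD_insert] <;> simp [Prod.ext_iff, ha]

-- A's inner loop fills row i correctly, given row i-1 is correct in d
theorem innerA_row (x y : List String) (i : Nat) (d : PySem.Dict (Int × Int) Int)
    (Hprev : ∀ b : Nat, b ≤ y.length → ∀ i' : Nat, i = i' + 1 →
      d.getD (((i' : Nat) : Int), (b : Int)) 0 = Lc x y i' b) :
    ∀ k : Nat, k ≤ y.length + 1 → ∀ b : Nat, b < k →
      ((PySem.List.pyRange 0 (k : Int) 1).foldl (lcsInnerA x y (i : Int)) d).getD ((i : Int), (b : Int)) 0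
        = Lc x y i b := by
  intro k
  induction k with
  | zero => intro _ b hb; omega
  | succ k ih =>
    intro hk b hb
    have hdecomp : PySem.List.pyRange 0 ((k + 1 : Nat) : Int) 1
        = PySem.List.pyRange 0 (k : Int) 1 ++ [(k : Int)] := by
      push_cast
      exact PySem.List.pyRange_one_succ_right (by positivity)
    rw [hdecomp, List.foldl_append]
    simp only [List.foldl_cons, List.foldl_nil]
    set D := (PySem.List.pyRange 0 (k : Int) 1).foldl (lcsInnerA x y (i : Int)) d with hD
    by_cases hbk : b = k
    · subst hbk
      -- the entry just written
      unfold lcsInnerA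
      rcases Nat.eq_zero_or_pos i with hi0 | hip
      · subst hi0
        simp [Lc_zero_left]
      rcases Nat.eq_zero_or_pos b with hb0 | hbp
      · subst hb0
        simp [Lc_zero_right, hip.ne']
      obtain ⟨i', rfl⟩ : ∃ i', i = i' + 1 := ⟨i - 1, by omega⟩
      obtain ⟨b', rfl⟩ : ∃ b', b = b' + 1 := ⟨b - 1, by omega⟩
      have hci : ((i' + 1 : Nat) : Int) - 1 = ((i' : Nat) : Int) := by push_cast; ring
      have hcb : ((b' + 1 : Nat) : Int) - 1 = ((b' : Nat) : Int) := by push_cast; ring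
      have hne : ¬(((i' + 1 : Nat) : Int) = 0 ∨ ((b' + 1 : Nat) : Int) = 0) := by
        push_cast; omega
      have hprev' : ∀ c : Nat, c ≤ y.length →
          D.getD (((i' : Nat) : Int), (c : Int)) 0 = Lc x y i' c := by
        intro c hc
        rw [hD, innerA_pres x y _ _ _ _ _ (by push_cast; omega)]
        exact Hprev c hc i' rfl
      simp only [hne, if_false, hci, hcb, PySem.List.pyGetD_natCast]
      by_cases hmatch : x.getD i' "" = y.getD b' ""
      · rw [if_pos hmatch, PySem.Dict.getD_insert, if_pos rfl,
          hprev' b' (by omega), Lc_succ, if_pos hmatch]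
      · rw [if_neg hmatch, PySem.Dict.getD_insert, if_pos rfl,
          hprev' (b' + 1) (by omega), ih (by omega) b' (by omega), Lc_succ, if_neg hmatch]
    · -- an earlier entry of row i, unchanged by the k-th insert
      have hbk' : b < k := by omega
      unfold lcsInnerA
      have hne2 : ¬(((i : Nat) : Int), ((b : Nat) : Int)) = (((i : Nat) : Int), ((k : Nat) : Int)) := by
        simp [Prod.ext_iff]; omega
      split_ifs <;> rw [PySem.Dict.getD_insert, if_neg hne2] <;> exact ih (by omega) b hbk'

-- the whole table is correct
theorem tableA_getD (x y : List String) :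
    ∀ a b : Nat, a ≤ x.length → b ≤ y.length →
      (lcsTableA x y).getD ((a : Int), (b : Int)) 0 = Lc x y a b := by
  suffices h : ∀ r : Nat, r ≤ x.length + 1 → ∀ a b : Nat, a < r → b ≤ y.length →
      ((PySem.List.pyRange 0 (r : Int) 1).foldl
        (fun t i => (PySem.List.pyRange 0 ((y.length : Int) + 1) 1).foldl (lcsInnerA x y i) t)
        PySem.Dict.empty).getD ((a : Int), (b : Int)) 0 = Lc x y a b by
    intro a b ha hb
    have := h (x.length + 1) (by omega) a b (by omega) hb
    unfold lcsTableA
    rw [show ((x.length : Int) + 1) = ((x.length + 1 : Nat) : Int) by push_cast; ring]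
    exact this
  intro r
  induction r with
  | zero => intro _ a b ha; omega
  | succ r ih =>
    intro hr a b ha hb
    have hdecomp : PySem.List.pyRange 0 ((r + 1 : Nat) : Int) 1
        = PySem.List.pyRange 0 (r : Int) 1 ++ [(r : Int)] := by
      push_cast
      exact PySem.List.pyRange_one_succ_right (by positivity)
    rw [hdecomp, List.foldl_append]
    simp only [List.foldl_cons, List.foldl_nil]
    rw [show ((y.length : Int) + 1) = ((y.length + 1 : Nat) : Int) by push_cast; ring]
    by_cases har : a = r
    · subst har
      exact innerA_row x y a _
        (fun c hc i' hi' => by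
          have h1 : i' < a := by omega
          exact ih (by omega) i' c h1 hc)
        (y.length + 1) (by omega) b (by omega)
    · rw [innerA_pres x y _ _ _ _ _ (by
        intro hcontra
        exact har (by exact_mod_cast hcontra))]
      exact ih (by omega) a b (by omega) hb

theorem rowv_zero (x y : List String) :
    (List.range (y.length + 1)).map (fun j => Lc x y 0 j) = List.replicate (y.length + 1) 0 := by
  rw [List.map_congr_left (fun j _ => Lc_zero_left x y j)]
  simp [List.map_const']

-- one step of B's row construction, over a prefix of y
theorem buildRowB_prefix (x y : List String) (i : Nat) :
    ∀ t : Nat, t ≤ y.length →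
      ((PySem.List.enumerate (y.take t) 1).foldl
        (fun cur p =>
          if x.getD i "" = p.2 then
            cur ++ [PySem.List.pyGetD ((List.range (y.length + 1)).map (fun j => Lc x y i j)) (p.1 - 1) 0 + 1]
          else
            cur ++ [max (PySem.List.pyGetD ((List.range (y.length + 1)).map (fun j => Lc x y i j)) p.1 0)
                        (PySem.List.pyGetD cur (p.1 - 1) 0)])
        [0])
      = (List.range (t + 1)).map (fun j => Lc x y (i + 1) j) := by
  intro t
  induction t with
  | zero => simp [Lc_zero_right]
  | succ t ih =>
    intro ht
    have htlt : t < y.length := by omega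
    have htake : y.take (t + 1) = y.take t ++ [y[t]] := by
      rw [List.take_add_one]
      simp [List.getElem?_eq_getElem htlt]
    rw [htake, PySem.List.enumerate_append, List.foldl_append, ih (by omega)]
    have hlen : (y.take t).length = t := by simp; omega
    rw [hlen]
    simp only [PySem.List.enumerate_cons, PySem.List.enumerate_nil, List.foldl_cons, List.foldl_nil]
    have hc1 : (1 : Int) + (t : Int) - 1 = ((t : Nat) : Int) := by omega
    have hc2 : (1 : Int) + (t : Int) = ((t + 1 : Nat) : Int) := by omega
    have hyt : y[t] = y.getD t "" := (List.getD_eq_getElem y "" htlt).symm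
    rw [hc1, hc2, hyt]
    have h1 : t < y.length + 1 := by omega
    have h2 : t + 1 < y.length + 1 := by omega
    have h3 : t < t + 1 := by omega
    simp only [PySem.List.pyGetD_natCast,
      PySem.List.getD_map_range _ _ _ _ h1,
      PySem.List.getD_map_range _ _ _ _ h2,
      PySem.List.getD_map_range _ _ _ _ h3]
    have hsplit : List.map (fun j => Lc x y (i + 1) j) (List.range (t + 1 + 1))
        = List.map (fun j => Lc x y (i + 1) j) (List.range (t + 1)) ++ [Lc x y (i + 1) (t + 1)] := by
      rw [List.range_succ, List.map_append]; rfl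
    rw [hsplit, Lc_succ]
    by_cases hm : x.getD i "" = y.getD t ""
    · rw [if_pos hm, if_pos hm]
    · rw [if_neg hm, if_neg hm]

-- B's buildRowB on a correct previous row yields the next row of Lc values
theorem buildRowB_correct (x y : List String) (i : Nat) :
    buildRowB y (x.getD i "") ((List.range (y.length + 1)).map (fun j => Lc x y i j))
      = (List.range (y.length + 1 + 1 - 1)).map (fun j => Lc x y (i + 1) j) := by
  unfold buildRowB
  have := buildRowB_prefix x y i y.length (by omega)
  rw [List.take_length] at this
  simpa using this

-- the outer fold of lcsRowsB, over a prefix of x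
theorem rowsB_state (x y : List String) :
    ∀ k : Nat, k ≤ x.length →
      ((x.take k).foldl
        (fun (st : List Int × List (List Int)) xi =>
          let cur := buildRowB y xi st.1
          (cur, st.2 ++ [cur]))
        (List.replicate (y.length + 1) 0, [List.replicate (y.length + 1) 0]))
      = ((List.range (y.length + 1)).map (fun j => Lc x y k j),
         (List.range (k + 1)).map (fun a => (List.range (y.length + 1)).map (fun j => Lc x y a j))) := by
  intro k
  induction k with
  | zero => simp [rowv_zero]
  | succ k ih =>
    intro hk
    have hklt : k < x.length := by omega
    have htake : x.take (k + 1) = x.take k ++ [x[k]] := by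
      rw [List.take_add_one]
      simp [List.getElem?_eq_getElem hklt]
    rw [htake, List.foldl_append, ih (by omega)]
    simp only [List.foldl_cons, List.foldl_nil]
    have hxk : x[k] = x.getD k "" := (List.getD_eq_getElem x "" hklt).symm
    rw [hxk]
    have hcur := buildRowB_correct x y k
    simp only at hcur ⊢
    rw [hcur]
    simp only [Prod.mk.injEq]
    refine ⟨by norm_num, ?_⟩
    rw [show k + 1 + 1 = (k + 1) + 1 by ring, List.range_succ (n := k + 1), List.map_append]
    norm_num

theorem rowsB_getD (x y : List String) :
    ∀ i j : Nat, i ≤ x.length → j ≤ y.length →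
      PySem.List.pyGetD (PySem.List.pyGetD (lcsRowsB x y) (i : Int) []) (j : Int) 0 = Lc x y i j := by
  intro i j hi hj
  unfold lcsRowsB
  have := rowsB_state x y x.length (by omega)
  rw [List.take_length] at this
  simp only at this ⊢
  rw [this]
  have hib : i < x.length + 1 := by omega
  have hjb : j < y.length + 1 := by omega
  simp [hib, hjb]

theorem back_eq_recon (x y : List String) :
    ∀ s i j : Nat, i + j ≤ s → i ≤ x.length → j ≤ y.length → ∀ out,
      backB x y (lcsRowsB x y) i j out
        = out ++ ((reconA x y (lcsTableA x y) i j).map (fun p => p.1)).reverse := by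
  intro s
  induction s with
  | zero =>
    intro i j hs hi hj out
    obtain rfl : i = 0 := by omega
    simp [backB, reconA]
  | succ s ih =>
    intro i j hs hi hj out
    match i, j with
    | 0, j => simp [backB, reconA]
    | i + 1, 0 => simp [backB, reconA]
    | i + 1, j + 1 =>
      rw [backB, reconA]
      have hrows1 : PySem.List.pyGetD (PySem.List.pyGetD (lcsRowsB x y) ((i : Nat) : Int) []) (((j : Nat) : Int) + 1) 0
          = Lc x y i (j + 1) := by
        rw [show (((j : Nat) : Int) + 1) = (((j + 1 : Nat)) : Int) by push_cast; ring]
        exact rowsB_getD x y i (j + 1) (by omega) (by omega)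
      have hrows2 : PySem.List.pyGetD (PySem.List.pyGetD (lcsRowsB x y) (((i : Nat) : Int) + 1) []) ((j : Nat) : Int) 0
          = Lc x y (i + 1) j := by
        rw [show (((i : Nat) : Int) + 1) = (((i + 1 : Nat)) : Int) by push_cast; ring]
        exact rowsB_getD x y (i + 1) j (by omega) (by omega)
      have htab1 : (lcsTableA x y).getD (((i : Nat) : Int), ((j : Nat) : Int) + 1) 0 = Lc x y i (j + 1) := by
        rw [show (((j : Nat) : Int) + 1) = (((j + 1 : Nat)) : Int) by push_cast; ring]
        exact tableA_getD x y i (j + 1) (by omega) (by omega)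
      have htab2 : (lcsTableA x y).getD (((i : Nat) : Int) + 1, ((j : Nat) : Int)) 0 = Lc x y (i + 1) j := by
        rw [show (((i : Nat) : Int) + 1) = (((i + 1 : Nat)) : Int) by push_cast; ring]
        exact tableA_getD x y (i + 1) j (by omega) (by omega)
      rw [hrows1, hrows2, htab1, htab2]
      by_cases hm : PySem.List.pyGetD x ((i : Nat) : Int) "" = PySem.List.pyGetD y ((j : Nat) : Int) ""
      · rw [if_pos hm, if_pos hm, ih i j (by omega) (by omega) (by omega)]
        simp
      · rw [if_neg hm, if_neg hm]
        by_cases hcmp : Lc x y i (j + 1) > Lc x y (i + 1) j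
        · rw [if_pos hcmp, if_pos hcmp, ih i (j + 1) (by omega) (by omega) (by omega)]
        · rw [if_neg hcmp, if_neg hcmp, ih (i + 1) j (by omega) (by omega) (by omega)]

theorem words_eq (x y : List String) : lcsWordsB x y = reconLcsA x y := by
  unfold lcsWordsB reconLcsA
  rw [back_eq_recon x y (x.length + y.length) x.length y.length (by omega) (by omega) (by omega) []]
  simp

-- ===== VERDICT (by name: the statement is the Claim_ definition above) =====
theorem union_lcs_py_spec : Claim_equal_union_lcs_py := by
  intro evaluated_sentences reference_sentence prev_union _ _
  unfold Spec_union_lcs_py union_lcs_py union_lcs_py_alt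
  simp only []
  have hfold : ∀ (l : List (List String)) (c : Int) (u : PySem.Set String),
      (l.foldl
        (fun (st : Int × PySem.Set String) eval_s =>
          let lcs := PySem.Set.ofList (reconLcsA reference_sentence eval_s)
          (st.1 + lcs.length, PySem.Set.union st.2 lcs))
        (c, u)).2
      = l.foldl
          (fun (u : PySem.Set String) eval_s =>
            PySem.Set.union u (PySem.Set.ofList (lcsWordsB reference_sentence eval_s)))
          u := by
    intro l
    induction l with
    | nil => intro c u; rfl
    | cons a t iht =>
      intro c u
      simp only [List.foldl_cons]
      rw [iht, words_eq]
  rw [hfold]
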